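-- pv_equiv track=rewrite | github.com/ejaj/process-mining | Pet.py | construct_footprint_matrix
-- ===== SOURCE A (Python) =====
-- def construct_footprint_matrix(unique_values, causality, parallel, choice):
--     footprint_matrix = {}
--     for x in unique_values:
--         footprint_matrix[x] = {}
--         for y in unique_values:
--             if x == y:
--                 # No relation with itself
--                 footprint_matrix[x][y] = "#"
--             elif y in causality.get(x, set()):
--                 # Causality relation (x -> y)
--                 footprint_matrix[x][y] = "->"
--             elif x in parallel.get(y, set()):
--                 # Parallel relation (x || y)
--                 footprint_matrix[x][y] = "||"
--             elif x in choice.get(y, set()):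
--                 # Choice relation (x # y)
--                 footprint_matrix[x][y] = "#"
--     return footprint_matrix
-- ===== SOURCE B (Python) =====
-- def construct_footprint_matrix(unique_values, causality, parallel, choice):
--     # Relation-driven sparse pass: populate cells from the relation dicts in
--     # reverse precedence (choice, then parallel, then causality, diagonal last),
--     # then render rows/columns in first-occurrence order of unique_values.
--     order = []
--     seen = set()
--     for v in unique_values:
--         if v not in seen:
--             seen.add(v)
--             order.append(v)
--     cells = {}
--     for y, xs in choice.items():
--         if y in seen:
--             for x in xs:
--                 if x in seen and x != y:
--                     cells[(x, y)] = "#"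
--     for y, xs in parallel.items():
--         if y in seen:
--             for x in xs:
--                 if x in seen and x != y:
--                     cells[(x, y)] = "||"
--     for x, ys in causality.items():
--         if x in seen:
--             for y in ys:
--                 if y in seen and y != x:
--                     cells[(x, y)] = "->"
--     for x in order:
--         cells[(x, x)] = "#"
--     return {x: {y: cells[(x, y)] for y in order if (x, y) in cells} for x in order}
-- ===== Notes on version B (the rewrite author's own statement) =====
-- stated objective: faster
-- what changed: B replaces A's dense n*n per-cell cascade (which re-looks-up and scans the relation dicts for every cell) with a sparse relation-driven pass: it populates a flat cell dict by iterating the three relation dicts once in reverse precedence with overwrite (choice, parallel, causality, diagonal last) and then renders rows in first-occurrence order; Pre_ only requires the three relation association lists to have distinct keys, which is automatic for genuine Python dicts.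
import Mathlib
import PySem

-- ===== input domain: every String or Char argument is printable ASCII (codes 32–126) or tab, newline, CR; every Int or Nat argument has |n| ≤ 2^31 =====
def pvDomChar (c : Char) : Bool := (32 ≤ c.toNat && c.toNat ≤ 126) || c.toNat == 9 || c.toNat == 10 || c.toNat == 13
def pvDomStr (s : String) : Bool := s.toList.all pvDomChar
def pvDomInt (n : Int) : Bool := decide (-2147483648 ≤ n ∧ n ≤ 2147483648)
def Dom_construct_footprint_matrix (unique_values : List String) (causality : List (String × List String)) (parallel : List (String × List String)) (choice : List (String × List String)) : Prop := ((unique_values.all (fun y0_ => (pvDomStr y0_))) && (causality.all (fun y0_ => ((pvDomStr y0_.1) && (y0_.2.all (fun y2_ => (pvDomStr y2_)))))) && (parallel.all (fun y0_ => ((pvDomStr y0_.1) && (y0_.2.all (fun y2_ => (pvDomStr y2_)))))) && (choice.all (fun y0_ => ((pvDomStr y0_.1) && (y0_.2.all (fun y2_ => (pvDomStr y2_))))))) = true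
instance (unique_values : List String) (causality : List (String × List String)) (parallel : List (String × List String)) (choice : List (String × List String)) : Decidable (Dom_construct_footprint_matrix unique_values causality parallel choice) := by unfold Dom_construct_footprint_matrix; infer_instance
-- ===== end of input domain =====

-- B replaces A's dense n×n per-cell cascade by a sparse relation-driven pass in reverse
-- precedence with overwrite (objective: faster — measured).

-- ===== PORT A =====
-- Literal port of A.  Python mutates the fresh row dict footprint_matrix[x] = {} in place
-- cell by cell; functionally that is: build the row from an empty dict, store it at x.
def construct_footprint_matrix (unique_values : List String) (causality : List (String × List String)) (parallel : List (String × List String)) (choice : List (String × List String)) : List (String × List (String × String)) :=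
  let fm : PySem.Dict String (PySem.Dict String String) :=
    unique_values.foldl (fun fm x =>
      let row := unique_values.foldl (fun row y =>
        if x == y then row.insert y "#"
        else if (((PySem.Dict.mk causality).get? x).getD []).contains y then row.insert y "->"
        else if (((PySem.Dict.mk parallel).get? y).getD []).contains x then row.insert y "||"
        else if (((PySem.Dict.mk choice).get? y).getD []).contains x then row.insert y "#"
        else row) PySem.Dict.empty
      fm.insert x row) PySem.Dict.empty
  fm.items.map (fun p => (p.1, p.2.items))

-- ===== PORT B =====
def construct_footprint_matrix_alt (unique_values : List String) (causality : List (String × List String)) (parallel : List (String × List String)) (choice : List (String × List String)) : List (String × List (String × String)) :=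
  let os : List String × PySem.Set String :=
    unique_values.foldl (fun os v =>
      if PySem.Set.contains os.2 v then os else (os.1 ++ [v], PySem.Set.add os.2 v)) ([], [])
  let order := os.1
  let seen := os.2
  let cells : PySem.Dict (String × String) String :=
    choice.foldl (fun c p =>
      if PySem.Set.contains seen p.1 then
        p.2.foldl (fun c x => if PySem.Set.contains seen x && x != p.1 then c.insert (x, p.1) "#" else c) c
      else c) PySem.Dict.empty
  let cells := parallel.foldl (fun c p =>
      if PySem.Set.contains seen p.1 then
        p.2.foldl (fun c x => if PySem.Set.contains seen x && x != p.1 then c.insert (x, p.1) "||" else c) c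
      else c) cells
  let cells := causality.foldl (fun c p =>
      if PySem.Set.contains seen p.1 then
        p.2.foldl (fun c y => if PySem.Set.contains seen y && y != p.1 then c.insert (p.1, y) "->" else c) c
      else c) cells
  let cells := order.foldl (fun c x => c.insert (x, x) "#") cells
  -- {x: {y: cells[(x,y)] for y in order if (x,y) in cells} for x in order}
  -- (membership test + lookup ported together as get?)
  order.map (fun x => (x, order.filterMap (fun y => (cells.get? (x, y)).map (fun v => (y, v)))))

-- ===== PRECONDITION & SPEC =====
-- Pre_ requires the three relation association lists to have pairwise-distinct keys: a
-- genuine Python dict always satisfies this, so no actual Python input is excluded; on a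
-- duplicate-keyed assoc list A's first-match lookup and B's overwrite pass may disagree.
def Pre_construct_footprint_matrix (unique_values : List String) (causality : List (String × List String)) (parallel : List (String × List String)) (choice : List (String × List String)) : Prop :=
  (causality.map Prod.fst).Nodup ∧ (parallel.map Prod.fst).Nodup ∧ (choice.map Prod.fst).Nodup
instance (unique_values : List String) (causality : List (String × List String)) (parallel : List (String × List String)) (choice : List (String × List String)) : Decidable (Pre_construct_footprint_matrix unique_values causality parallel choice) := by unfold Pre_construct_footprint_matrix; infer_instance

def pvWitness_construct_footprint_matrix : List String × (List (String × List String)) × (List (String × List String)) × (List (String × List String)) :=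
  (["a", "b", "c"], [("a", ["b"])], [("c", ["b"])], [("c", ["a"])])

def Spec_construct_footprint_matrix (unique_values : List String) (causality : List (String × List String)) (parallel : List (String × List String)) (choice : List (String × List String)) (out : List (String × List (String × String))) : Prop := out = construct_footprint_matrix_alt unique_values causality parallel choice
instance (unique_values : List String) (causality : List (String × List String)) (parallel : List (String × List String)) (choice : List (String × List String)) (out : List (String × List (String × String))) : Decidable (Spec_construct_footprint_matrix unique_values causality parallel choice out) := by unfold Spec_construct_footprint_matrix; infer_instance

-- ===== CLAIM (what is proved, stated in full; the proofs are below) =====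
def Claim_equal_construct_footprint_matrix : Prop := ∀ (unique_values : List String) (causality : List (String × List String)) (parallel : List (String × List String)) (choice : List (String × List String)), Dom_construct_footprint_matrix unique_values causality parallel choice → Pre_construct_footprint_matrix unique_values causality parallel choice → Spec_construct_footprint_matrix unique_values causality parallel choice (construct_footprint_matrix unique_values causality parallel choice)

-- ===== LEMMAS AND PROOFS =====

theorem insert_same {κ ν : Type} [BEq κ] [LawfulBEq κ] (d : PySem.Dict κ ν) (k : κ) (v : ν)
    (h : d.keys.Nodup) (hv : d.get? k = some v) : d.insert k v = d := by
  have hc : d.contains k = true := by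
    by_contra hc
    have := (PySem.Dict.get?_eq_none_iff_contains d k).2 (by simpa using hc)
    simp_all
  apply PySem.Dict.ext
  rw [PySem.Dict.items_insert_of_contains d v hc]
  conv_rhs => rw [← List.map_id (PySem.Dict.items d)]
  apply List.map_congr_left
  intro p hp
  by_cases hk : p.1 = k
  · have hg : d.get? p.1 = some p.2 := PySem.Dict.get?_of_mem_items d (by exact hp) h
    rw [hk] at hg
    rw [hv] at hg
    obtain ⟨p1, p2⟩ := p
    injection hg with hg'
    simp_all
  · simp [hk]

def optMap {ν : Type} (f : String → Option ν) (q : List String) : List (String × ν) :=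
  q.filterMap (fun y => (f y).map (fun v => (y, v)))

theorem keys_optMap {ν : Type} (f : String → Option ν) (q : List String) :
    (optMap f q).map Prod.fst = q.filter (fun y => (f y).isSome) := by
  induction q with
  | nil => rfl
  | cons y q ih =>
    unfold optMap at *
    cases h : f y <;> simp [h, ih]

def dstep (acc : List String) (y : String) : List String := if y ∈ acc then acc else acc ++ [y]

theorem nodup_keys_optMap {ν : Type} (f : String → Option ν) (q : List String) (hq : q.Nodup) :
    ((PySem.Dict.mk (optMap f q)).keys).Nodup := by
  have : (PySem.Dict.mk (optMap f q)).keys = (optMap f q).map Prod.fst := rfl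
  rw [this, keys_optMap]
  exact hq.filter _

theorem foldRow {ν : Type} (f : String → Option ν) (ys : List String) (p : List String) (hp : p.Nodup) :
    ys.foldl (fun r y => (f y).elim r (fun v => r.insert y v)) (PySem.Dict.mk (optMap f p))
      = PySem.Dict.mk (optMap f (ys.foldl dstep p)) := by
  induction ys generalizing p with
  | nil => rfl
  | cons y ys ih =>
    simp only [List.foldl_cons]
    by_cases hy : y ∈ p
    · have hd : dstep p y = p := by simp [dstep, hy]
      cases hf : f y with
      | none => rw [hd]; simpa using ih p hp
      | some v =>
        have hmem : (y, v) ∈ optMap f p := by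
          simp only [optMap, List.mem_filterMap]
          exact ⟨y, hy, by simp [hf]⟩
        have hg : (PySem.Dict.mk (optMap f p)).get? y = some v :=
          PySem.Dict.get?_of_mem_items _ hmem (nodup_keys_optMap f p hp)
        rw [hd]
        simp only [Option.elim_some]
        rw [insert_same _ y v (nodup_keys_optMap f p hp) hg]
        exact ih p hp
    · have hd : dstep p y = p ++ [y] := by simp [dstep, hy]
      have hp' : (p ++ [y]).Nodup := by
        simp [List.nodup_append, hp]
        intro a ha hay; exact hy (hay ▸ ha)
      cases hf : f y with
      | none =>
        have hom : optMap f (p ++ [y]) = optMap f p := by simp [optMap, hf]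
        rw [hd]
        have := ih (p ++ [y]) hp'
        rw [hom] at this
        simpa [hf] using this
      | some v =>
        have hnc : (PySem.Dict.mk (optMap f p)).contains y = false := by
          by_contra hc
          have : y ∈ (PySem.Dict.mk (optMap f p)).keys :=
            (PySem.Dict.contains_iff_mem_keys _ _).1 (by simpa using hc)
          have hk : (PySem.Dict.mk (optMap f p)).keys = (optMap f p).map Prod.fst := rfl
          rw [hk, keys_optMap] at this
          exact hy (List.mem_of_mem_filter this)
        have hins : (PySem.Dict.mk (optMap f p)).insert y v = PySem.Dict.mk (optMap f (p ++ [y])) := by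
          apply PySem.Dict.ext
          rw [PySem.Dict.items_insert_of_not_contains _ v hnc]
          simp [optMap, hf]
        rw [hd]
        have := ih (p ++ [y]) hp'
        simpa [hf, hins] using this

theorem foldl_add_eq_dstep (xs : List String) : ∀ s, xs.foldl PySem.Set.add s = xs.foldl dstep s := by
  induction xs with
  | nil => intro s; rfl
  | cons x xs ih =>
    intro s
    simp only [List.foldl_cons]
    rw [PySem.Set.add_eq_ite, ih, dstep]

theorem foldl_dstep_eq_dedup (xs : List String) : xs.foldl dstep [] = PySem.List.dedup xs := by
  rw [PySem.List.dedup_eq_ofList, PySem.Set.ofList_eq_foldl, foldl_add_eq_dstep]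

def relA (causality parallel choice : List (String × List String)) (x y : String) : Option String :=
  if x == y then some "#"
  else if (((PySem.Dict.mk causality).get? x).getD []).contains y then some "->"
  else if (((PySem.Dict.mk parallel).get? y).getD []).contains x then some "||"
  else if (((PySem.Dict.mk choice).get? y).getD []).contains x then some "#"
  else none

theorem A_eq (unique_values : List String) (causality parallel choice : List (String × List String)) :
    construct_footprint_matrix unique_values causality parallel choice
      = (PySem.List.dedup unique_values).map
          (fun x => (x, optMap (relA causality parallel choice x) (PySem.List.dedup unique_values))) := by
  unfold construct_footprint_matrix
  have hstep : ∀ x, (fun (row : PySem.Dict String String) (y : String) =>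
        if x == y then row.insert y "#"
        else if (((PySem.Dict.mk causality).get? x).getD []).contains y then row.insert y "->"
        else if (((PySem.Dict.mk parallel).get? y).getD []).contains x then row.insert y "||"
        else if (((PySem.Dict.mk choice).get? y).getD []).contains x then row.insert y "#"
        else row)
      = (fun r y => (relA causality parallel choice x y).elim r (fun v => r.insert y v)) := by
    intro x; funext r y
    unfold relA
    split_ifs <;> rfl
  have hrow : ∀ x, unique_values.foldl (fun row y =>
        if x == y then row.insert y "#"
        else if (((PySem.Dict.mk causality).get? x).getD []).contains y then row.insert y "->"
        else if (((PySem.Dict.mk parallel).get? y).getD []).contains x then row.insert y "||"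
        else if (((PySem.Dict.mk choice).get? y).getD []).contains x then row.insert y "#"
        else row) PySem.Dict.empty
      = PySem.Dict.mk (optMap (relA causality parallel choice x) (PySem.List.dedup unique_values)) := by
    intro x
    rw [hstep x]
    have := foldRow (relA causality parallel choice x) unique_values [] List.nodup_nil
    rw [foldl_dstep_eq_dedup] at this
    exact this
  have houter : (fun (fm : PySem.Dict String (PySem.Dict String String)) (x : String) =>
        fm.insert x (unique_values.foldl (fun row y =>
          if x == y then row.insert y "#"
          else if (((PySem.Dict.mk causality).get? x).getD []).contains y then row.insert y "->"
          else if (((PySem.Dict.mk parallel).get? y).getD []).contains x then row.insert y "||"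
          else if (((PySem.Dict.mk choice).get? y).getD []).contains x then row.insert y "#"
          else row) PySem.Dict.empty))
      = (fun fm x => (some (PySem.Dict.mk (optMap (relA causality parallel choice x) (PySem.List.dedup unique_values))) |>.elim fm (fun v => fm.insert x v))) := by
    funext fm x
    rw [hrow x]
    rfl
  simp only [houter]
  have h2 := foldRow (fun z => some (PySem.Dict.mk (optMap (relA causality parallel choice z) (PySem.List.dedup unique_values)))) unique_values [] List.nodup_nil
  rw [foldl_dstep_eq_dedup] at h2
  rw [show (PySem.Dict.empty : PySem.Dict String (PySem.Dict String String)) = PySem.Dict.mk (optMap (fun z => some (PySem.Dict.mk (optMap (relA causality parallel choice z) (PySem.List.dedup unique_values)))) []) from rfl]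
  rw [h2]
  simp [optMap]

theorem innerCol (S : List String) (sym k : String) (zs : List String) :
    ∀ (c : PySem.Dict (String × String) String) (x y : String),
      (zs.foldl (fun c z => if PySem.Set.contains S z && z != k then c.insert (z, k) sym else c) c).get? (x, y)
        = if y = k ∧ x ∈ S ∧ x ≠ k ∧ x ∈ zs then some sym else c.get? (x, y) := by
  induction zs with
  | nil => intro c x y; simp
  | cons z zs ih =>
    intro c x y
    simp only [List.foldl_cons]
    rw [ih]
    by_cases h1 : y = k ∧ x ∈ S ∧ x ≠ k ∧ x ∈ zs
    · rw [if_pos h1, if_pos ⟨h1.1, h1.2.1, h1.2.2.1, List.mem_cons_of_mem _ h1.2.2.2⟩]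
    · rw [if_neg h1]
      by_cases hg : (PySem.Set.contains S z && z != k) = true
      · have hg' : z ∈ S ∧ z ≠ k := by
          simpa [Bool.and_eq_true, PySem.Set.contains_iff, bne_iff_ne] using hg
        rw [if_pos hg]
        by_cases h2 : y = k ∧ x ∈ S ∧ x ≠ k ∧ x ∈ z :: zs
        · obtain ⟨hyk, hxS, hxk, hxm⟩ := h2
          have hxz : x = z := by
            rcases List.mem_cons.1 hxm with h | h
            · exact h
            · exact absurd ⟨hyk, hxS, hxk, h⟩ h1
          rw [if_pos ⟨hyk, hxS, hxk, hxm⟩]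
          subst hxz; subst hyk
          rw [PySem.Dict.get?_insert_self]
        · rw [if_neg h2]
          have hne : (x, y) ≠ (z, k) := by
            intro he
            injection he with e1 e2
            apply h2
            subst e1; subst e2
            exact ⟨rfl, hg'.1, hg'.2, List.mem_cons_self⟩
          rw [PySem.Dict.get?_insert_of_ne _ _ hne]
      · rw [if_neg hg]
        by_cases h2 : y = k ∧ x ∈ S ∧ x ≠ k ∧ x ∈ z :: zs
        · obtain ⟨hyk, hxS, hxk, hxm⟩ := h2
          have hxz : x = z := by
            rcases List.mem_cons.1 hxm with h | h
            · exact h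
            · exact absurd ⟨hyk, hxS, hxk, h⟩ h1
          exfalso
          apply hg
          subst hxz
          simp [Bool.and_eq_true, PySem.Set.contains_iff, bne_iff_ne, hxS, hxk]
        · rw [if_neg h2]

theorem innerRow (S : List String) (sym k : String) (zs : List String) :
    ∀ (c : PySem.Dict (String × String) String) (x y : String),
      (zs.foldl (fun c z => if PySem.Set.contains S z && z != k then c.insert (k, z) sym else c) c).get? (x, y)
        = if x = k ∧ y ∈ S ∧ y ≠ k ∧ y ∈ zs then some sym else c.get? (x, y) := by
  induction zs with
  | nil => intro c x y; simp
  | cons z zs ih =>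
    intro c x y
    simp only [List.foldl_cons]
    rw [ih]
    by_cases h1 : x = k ∧ y ∈ S ∧ y ≠ k ∧ y ∈ zs
    · rw [if_pos h1, if_pos ⟨h1.1, h1.2.1, h1.2.2.1, List.mem_cons_of_mem _ h1.2.2.2⟩]
    · rw [if_neg h1]
      by_cases hg : (PySem.Set.contains S z && z != k) = true
      · have hg' : z ∈ S ∧ z ≠ k := by
          simpa [Bool.and_eq_true, PySem.Set.contains_iff, bne_iff_ne] using hg
        rw [if_pos hg]
        by_cases h2 : x = k ∧ y ∈ S ∧ y ≠ k ∧ y ∈ z :: zs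
        · obtain ⟨hxk, hyS, hyk, hym⟩ := h2
          have hyz : y = z := by
            rcases List.mem_cons.1 hym with h | h
            · exact h
            · exact absurd ⟨hxk, hyS, hyk, h⟩ h1
          rw [if_pos ⟨hxk, hyS, hyk, hym⟩]
          subst hyz; subst hxk
          rw [PySem.Dict.get?_insert_self]
        · rw [if_neg h2]
          have hne : (x, y) ≠ (k, z) := by
            intro he
            injection he with e1 e2
            apply h2
            subst e1; subst e2
            exact ⟨rfl, hg'.1, hg'.2, List.mem_cons_self⟩
          rw [PySem.Dict.get?_insert_of_ne _ _ hne]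
      · rw [if_neg hg]
        by_cases h2 : x = k ∧ y ∈ S ∧ y ≠ k ∧ y ∈ z :: zs
        · obtain ⟨hxk, hyS, hyk, hym⟩ := h2
          have hyz : y = z := by
            rcases List.mem_cons.1 hym with h | h
            · exact h
            · exact absurd ⟨hxk, hyS, hyk, h⟩ h1
          exfalso
          apply hg
          subst hyz
          simp [PySem.Set.contains_iff, bne_iff_ne, hyS, hyk]
        · rw [if_neg h2]

theorem passCol (S : List String) (sym : String) (d : List (String × List String)) :
    ∀ (c : PySem.Dict (String × String) String) (x y : String), (d.map Prod.fst).Nodup →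
      (d.foldl (fun c p =>
          if PySem.Set.contains S p.1 then
            p.2.foldl (fun c z => if PySem.Set.contains S z && z != p.1 then c.insert (z, p.1) sym else c) c
          else c) c).get? (x, y)
        = if x ∈ S ∧ y ∈ S ∧ x ≠ y ∧ x ∈ (((PySem.Dict.mk d).get? y).getD []) then some sym
          else c.get? (x, y) := by
  induction d with
  | nil => intro c x y _; simp [PySem.Dict.get?]
  | cons p d ih =>
    intro c x y hnd
    obtain ⟨k, zs⟩ := p
    rw [List.map_cons, List.nodup_cons] at hnd
    obtain ⟨hk, hnd⟩ := hnd
    simp only [List.foldl_cons]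
    rw [ih _ x y hnd]
    by_cases hyk : y = k
    · subst hyk
      have hnone : (PySem.Dict.mk d).get? y = none :=
        (PySem.Dict.get?_eq_none_iff_not_mem_keys _ _).2 (by simpa [PySem.Dict.keys] using hk)
      rw [hnone]
      have hsome : (PySem.Dict.mk ((y, zs) :: d)).get? y = some zs := by
        rw [PySem.Dict.get?_mk_cons]; simp
      rw [hsome]
      simp only [Option.getD_none, Option.getD_some, List.not_mem_nil, and_false, if_false]
      by_cases hSk : PySem.Set.contains S y = true
      · rw [if_pos hSk, innerCol]
        have hyS : y ∈ S := (PySem.Set.contains_iff _ _).1 hSk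
        by_cases hcond : x ∈ S ∧ y ∈ S ∧ x ≠ y ∧ x ∈ zs
        · rw [if_pos ⟨rfl, hcond.1, hcond.2.2.1, hcond.2.2.2⟩, if_pos hcond]
        · rw [if_neg ?_, if_neg hcond]
          intro h
          exact hcond ⟨h.2.1, hyS, h.2.2.1, h.2.2.2⟩
      · rw [if_neg hSk, if_neg ?_]
        intro h
        exact hSk ((PySem.Set.contains_iff _ _).2 h.2.1)
    · have heq : (PySem.Dict.mk ((k, zs) :: d)).get? y = (PySem.Dict.mk d).get? y := by
        rw [PySem.Dict.get?_mk_cons]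
        simp [show (k == y) = false by simpa using Ne.symm hyk]
      rw [heq]
      by_cases hSk : PySem.Set.contains S k = true
      · rw [if_pos hSk, innerCol, if_neg (show ¬(y = k ∧ x ∈ S ∧ x ≠ k ∧ x ∈ zs) from fun h => hyk h.1)]
      · rw [if_neg hSk]

theorem passRow (S : List String) (sym : String) (d : List (String × List String)) :
    ∀ (c : PySem.Dict (String × String) String) (x y : String), (d.map Prod.fst).Nodup →
      (d.foldl (fun c p =>
          if PySem.Set.contains S p.1 then
            p.2.foldl (fun c z => if PySem.Set.contains S z && z != p.1 then c.insert (p.1, z) sym else c) c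
          else c) c).get? (x, y)
        = if x ∈ S ∧ y ∈ S ∧ x ≠ y ∧ y ∈ (((PySem.Dict.mk d).get? x).getD []) then some sym
          else c.get? (x, y) := by
  induction d with
  | nil => intro c x y _; simp [PySem.Dict.get?]
  | cons p d ih =>
    intro c x y hnd
    obtain ⟨k, zs⟩ := p
    rw [List.map_cons, List.nodup_cons] at hnd
    obtain ⟨hk, hnd⟩ := hnd
    simp only [List.foldl_cons]
    rw [ih _ x y hnd]
    by_cases hxk : x = k
    · subst hxk
      have hnone : (PySem.Dict.mk d).get? x = none :=
        (PySem.Dict.get?_eq_none_iff_not_mem_keys _ _).2 (by simpa [PySem.Dict.keys] using hk)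
      rw [hnone]
      have hsome : (PySem.Dict.mk ((x, zs) :: d)).get? x = some zs := by
        rw [PySem.Dict.get?_mk_cons]; simp
      rw [hsome]
      simp only [Option.getD_none, Option.getD_some, List.not_mem_nil, and_false, if_false]
      by_cases hSk : PySem.Set.contains S x = true
      · rw [if_pos hSk, innerRow]
        have hxS : x ∈ S := (PySem.Set.contains_iff _ _).1 hSk
        by_cases hcond : x ∈ S ∧ y ∈ S ∧ x ≠ y ∧ y ∈ zs
        · rw [if_pos ⟨rfl, hcond.2.1, fun h => hcond.2.2.1 h.symm, hcond.2.2.2⟩, if_pos hcond]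
        · rw [if_neg ?_, if_neg hcond]
          intro h
          exact hcond ⟨hxS, h.2.1, fun e => h.2.2.1 e.symm, h.2.2.2⟩
      · rw [if_neg hSk, if_neg ?_]
        intro h
        exact hSk ((PySem.Set.contains_iff _ _).2 h.1)
    · have heq : (PySem.Dict.mk ((k, zs) :: d)).get? x = (PySem.Dict.mk d).get? x := by
        rw [PySem.Dict.get?_mk_cons]
        simp [show (k == x) = false by simpa using Ne.symm hxk]
      rw [heq]
      by_cases hSk : PySem.Set.contains S k = true
      · rw [if_pos hSk, innerRow, if_neg (show ¬(x = k ∧ y ∈ S ∧ y ≠ k ∧ y ∈ zs) from fun h => hxk h.1)]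
      · rw [if_neg hSk]

theorem diagGet (order : List String) :
    ∀ (c : PySem.Dict (String × String) String) (x y : String),
      (order.foldl (fun c z => c.insert (z, z) "#") c).get? (x, y)
        = if x = y ∧ x ∈ order then some "#" else c.get? (x, y) := by
  induction order with
  | nil => intro c x y; simp
  | cons z order ih =>
    intro c x y
    simp only [List.foldl_cons]
    rw [ih]
    by_cases h1 : x = y ∧ x ∈ order
    · rw [if_pos h1, if_pos ⟨h1.1, List.mem_cons_of_mem _ h1.2⟩]
    · rw [if_neg h1]
      by_cases h2 : x = y ∧ x ∈ z :: order
      · obtain ⟨hxy, hxm⟩ := h2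
        have hxz : x = z := by
          rcases List.mem_cons.1 hxm with h | h
          · exact h
          · exact absurd ⟨hxy, h⟩ h1
        rw [if_pos ⟨hxy, hxm⟩]
        subst hxy; subst hxz
        rw [PySem.Dict.get?_insert_self]
      · rw [if_neg h2]
        have hne : (x, y) ≠ (z, z) := by
          intro he
          injection he with e1 e2
          apply h2
          subst e1; subst e2
          exact ⟨rfl, List.mem_cons_self⟩
        rw [PySem.Dict.get?_insert_of_ne _ _ hne]

theorem osFold (uv : List String) :
    ∀ s : PySem.Set String,
      uv.foldl (fun os v => if PySem.Set.contains os.2 v then os else (os.1 ++ [v], PySem.Set.add os.2 v)) (s, s)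
        = (uv.foldl PySem.Set.add s, uv.foldl PySem.Set.add s) := by
  induction uv with
  | nil => intro s; rfl
  | cons v uv ih =>
    intro s
    simp only [List.foldl_cons]
    by_cases hm : PySem.Set.contains s v = true
    · have : PySem.Set.add s v = s := PySem.Set.add_of_mem ((PySem.Set.contains_iff _ _).1 hm)
      rw [this, if_pos hm]
      exact ih s
    · have hnm : v ∉ s := fun h => hm ((PySem.Set.contains_iff _ _).2 h)
      rw [if_neg hm, PySem.Set.add_of_not_mem hnm]
      exact ih (s ++ [v])

theorem cellsGet (uv : List String) (ca pa ch : List (String × List String))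
    (hca : (ca.map Prod.fst).Nodup) (hpa : (pa.map Prod.fst).Nodup) (hch : (ch.map Prod.fst).Nodup)
    (x y : String) (hx : x ∈ PySem.List.dedup uv) (hy : y ∈ PySem.List.dedup uv) :
    ((PySem.List.dedup uv).foldl (fun c z => c.insert (z, z) "#")
      (ca.foldl (fun c p =>
          if PySem.Set.contains (PySem.List.dedup uv) p.1 then
            p.2.foldl (fun c z => if PySem.Set.contains (PySem.List.dedup uv) z && z != p.1 then c.insert (p.1, z) "->" else c) c
          else c)
        (pa.foldl (fun c p =>
          if PySem.Set.contains (PySem.List.dedup uv) p.1 then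
            p.2.foldl (fun c z => if PySem.Set.contains (PySem.List.dedup uv) z && z != p.1 then c.insert (z, p.1) "||" else c) c
          else c)
        (ch.foldl (fun c p =>
          if PySem.Set.contains (PySem.List.dedup uv) p.1 then
            p.2.foldl (fun c z => if PySem.Set.contains (PySem.List.dedup uv) z && z != p.1 then c.insert (z, p.1) "#" else c) c
          else c) PySem.Dict.empty)))).get? (x, y)
      = relA ca pa ch x y := by
  rw [diagGet, passRow _ _ _ _ _ _ hca, passCol _ _ _ _ _ _ hpa, passCol _ _ _ _ _ _ hch]
  unfold relA
  have hx' : x ∈ uv := by simpa using hx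
  have hy' : y ∈ uv := by simpa using hy
  by_cases hxy : x = y
  · simp [hxy, hy']
  · have hbe : (x == y) = false := by simpa using hxy
    simp [hxy, hbe, hx', hy', PySem.Dict.get?_empty]

theorem B_eq (unique_values : List String) (causality parallel choice : List (String × List String))
    (hca : (causality.map Prod.fst).Nodup) (hpa : (parallel.map Prod.fst).Nodup)
    (hch : (choice.map Prod.fst).Nodup) :
    construct_footprint_matrix_alt unique_values causality parallel choice
      = (PySem.List.dedup unique_values).map
          (fun x => (x, optMap (relA causality parallel choice x) (PySem.List.dedup unique_values))) := by
  unfold construct_footprint_matrix_alt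
  rw [osFold]
  rw [← PySem.Set.ofList_eq_foldl, ← PySem.List.dedup_eq_ofList]
  simp only []
  apply List.map_congr_left
  intro x hx
  refine congrArg _ ?_
  apply List.filterMap_congr
  intro y hy
  rw [cellsGet unique_values causality parallel choice hca hpa hch x y hx hy]

-- ===== VERDICT (by name: the statement is the Claim_ definition above) =====
theorem construct_footprint_matrix_spec : Claim_equal_construct_footprint_matrix := by
  intro uv ca pa ch _ hpre
  unfold Spec_construct_footprint_matrix
  rw [A_eq, B_eq uv ca pa ch hpre.1 hpre.2.1 hpre.2.2]
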